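-- pv_equiv track=rewrite | github.com/arminiranpour/TailorResume-Demo | ai-service/app/pipelines/bullet_rewrite.py | _is_salvageable_blocked_term
-- ===== SOURCE A (Python) =====
-- from typing import Any, Dict, FrozenSet, Iterable, List, Optional, Sequence, Set, Tuple
--
-- def _is_salvageable_blocked_term(term: str, salvageable_terms: FrozenSet[str]) -> bool:
--     if term in salvageable_terms:
--         return True
--     term_tokens = set(term.split())
--     for salvageable in salvageable_terms:
--         if not salvageable:
--             continue
--         if " " in salvageable and salvageable in term:
--             return True
--         if salvageable in term_tokens:
--             return True
--     return False
-- ===== SOURCE B (Python) =====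
-- def _is_salvageable_blocked_term(term: str, salvageable_terms) -> bool:
--     blocked = set(salvageable_terms)
--     if term in blocked:
--         return True
--     if any(tok in blocked for tok in term.split()):
--         return True
--     maxlen = 0
--     for s in blocked:
--         if " " in s and len(s) > maxlen:
--             maxlen = len(s)
--     n = len(term)
--     for i in range(n):
--         for j in range(i + 1, min(n, i + maxlen) + 1):
--             sub = term[i:j]
--             if " " in sub and sub in blocked:
--                 return True
--     return False
-- ===== Notes on version B (the rewrite author's own statement) =====
-- stated objective: alternative
-- what changed: Reverses the direction of the search: instead of scanning the salvageable set and testing each entry against the term, B enumerates candidates derived from the term itself (the term, its whitespace tokens, and every space-containing substring term[i:j] no longer than the longest space-containing salvageable entry) and tests each by hash-set membership; the per-entry substring/token tests over salvageable_terms disappear.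
import Mathlib
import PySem

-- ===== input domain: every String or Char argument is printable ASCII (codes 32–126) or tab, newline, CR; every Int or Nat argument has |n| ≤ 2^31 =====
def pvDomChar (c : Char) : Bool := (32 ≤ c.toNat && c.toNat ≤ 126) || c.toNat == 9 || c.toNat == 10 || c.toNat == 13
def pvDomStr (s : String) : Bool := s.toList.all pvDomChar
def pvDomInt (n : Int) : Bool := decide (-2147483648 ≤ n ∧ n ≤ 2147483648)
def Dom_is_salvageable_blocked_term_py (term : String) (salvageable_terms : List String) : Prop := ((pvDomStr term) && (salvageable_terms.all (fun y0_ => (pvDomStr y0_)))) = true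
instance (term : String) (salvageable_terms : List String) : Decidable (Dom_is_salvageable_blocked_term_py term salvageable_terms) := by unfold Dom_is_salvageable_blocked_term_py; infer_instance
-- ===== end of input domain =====

-- B reverses the search direction: it enumerates candidates from the term (the term, its tokens,
-- every space-containing substring term[i:j] within a window bounded by the longest
-- space-containing salvageable entry) and tests each by set membership; no speed claim.

-- ===== PORT A =====
def pvLoopA (term : String) (term_tokens : PySem.Set String) : List String → Bool
  | [] => false
  | salvageable :: rest =>
    if salvageable = "" then pvLoopA term term_tokens rest
    else if PySem.Str.isIn " " salvageable && PySem.Str.isIn salvageable term then true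
    else if PySem.Set.contains term_tokens salvageable then true
    else pvLoopA term term_tokens rest

def is_salvageable_blocked_term_py (term : String) (salvageable_terms : List String) : Bool :=
  if salvageable_terms.contains term then true
  else pvLoopA term (PySem.Set.ofList (PySem.Str.split₀ term)) salvageable_terms

-- ===== PORT B =====
-- the 'maxlen = 0; for s in blocked: if " " in s and len(s) > maxlen: maxlen = len(s)' loop
def pvMaxLenB (blocked : PySem.Set String) : Int :=
  blocked.foldl (fun m s => if PySem.Str.isIn " " s && decide (m < PySem.Str.len s)
    then PySem.Str.len s else m) 0

-- the nested 'for i in range(n): for j in range(i+1, min(n, i+maxlen)+1): … return True' scan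
def pvSubScanB (term : String) (blocked : PySem.Set String) (maxlen : Int) : Bool :=
  (PySem.List.pyRange 0 (PySem.Str.len term) 1).any fun i =>
    (PySem.List.pyRange (i + 1) (min (PySem.Str.len term) (i + maxlen) + 1) 1).any fun j =>
      let sub := PySem.Str.slice term (some i) (some j)
      PySem.Str.isIn " " sub && PySem.Set.contains blocked sub

def is_salvageable_blocked_term_py_alt (term : String) (salvageable_terms : List String) : Bool :=
  let blocked := PySem.Set.ofList salvageable_terms
  if PySem.Set.contains blocked term then true
  else if (PySem.Str.split₀ term).any (fun tok => PySem.Set.contains blocked tok) then true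
  else pvSubScanB term blocked (pvMaxLenB blocked)

-- ===== PRECONDITION & SPEC =====
def Spec_is_salvageable_blocked_term_py (term : String) (salvageable_terms : List String) (out : Bool) : Prop := out = is_salvageable_blocked_term_py_alt term salvageable_terms
instance (term : String) (salvageable_terms : List String) (out : Bool) : Decidable (Spec_is_salvageable_blocked_term_py term salvageable_terms out) := by unfold Spec_is_salvageable_blocked_term_py; infer_instance

-- ===== CLAIM (what is proved, stated in full; the proofs are below) =====
def Claim_equal_is_salvageable_blocked_term_py : Prop := ∀ (term : String) (salvageable_terms : List String), Dom_is_salvageable_blocked_term_py term salvageable_terms → Spec_is_salvageable_blocked_term_py term salvageable_terms (is_salvageable_blocked_term_py term salvageable_terms)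

-- ===== LEMMAS AND PROOFS =====

-- A's loop is the disjunction of its per-element test
theorem pv_loopA_eq_any (term : String) (tokens : PySem.Set String) (l : List String) :
    pvLoopA term tokens l
      = l.any (fun s => !(s == "")
          && ((PySem.Str.isIn " " s && PySem.Str.isIn s term) || PySem.Set.contains tokens s)) := by
  induction l with
  | nil => simp [pvLoopA]
  | cons s rest ih =>
    simp only [pvLoopA, List.any_cons, ← ih]
    by_cases h0 : s = ""
    · simp [h0]
    · have hb : (s == "") = false := beq_eq_false_iff_ne.2 h0
      simp [h0, hb, Bool.or_assoc]

-- every token of s.split() is nonempty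
theorem pv_split_go_ne_nil (cs : List Char) : ∀ cur acc,
    (∀ t ∈ acc, t ≠ []) →
    ∀ t ∈ PySem.Chars.split₀.go cs cur acc, t ≠ [] := by
  induction cs with
  | nil =>
    intro cur acc hacc t ht
    simp only [PySem.Chars.split₀.go] at ht
    split at ht
    · simp only [List.mem_reverse] at ht; exact hacc t ht
    · next hcur =>
      simp only [List.mem_reverse, List.mem_cons] at ht
      rcases ht with h | h
      · subst h; simpa using hcur
      · exact hacc t h
  | cons c rest ih =>
    intro cur acc hacc t ht
    simp only [PySem.Chars.split₀.go] at ht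
    split at ht
    · split at ht
      · exact ih [] acc hacc t ht
      · next hcur =>
        refine ih [] (cur.reverse :: acc) ?_ t ht
        intro u hu
        rcases List.mem_cons.1 hu with h | h
        · subst h; simpa using hcur
        · exact hacc u h
    · exact ih (c :: cur) acc hacc t ht

theorem pv_tokens_ne_empty (s : String) :
    ∀ t ∈ PySem.Str.split₀ s, t ≠ "" := by
  intro t ht
  simp only [PySem.Str.split₀, List.mem_map] at ht
  obtain ⟨u, hu, rfl⟩ := ht
  have := pv_split_go_ne_nil s.toList [] [] (by simp) u hu
  intro h
  apply this
  have : (String.ofList u).toList = "".toList := by rw [h]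
  simpa using this

-- " " in s forces s nonempty
theorem pv_space_ne_empty (s : String) (h : PySem.Str.isIn " " s = true) : s ≠ "" := by
  rw [PySem.Str.isIn_iff_infix] at h
  intro he
  subst he
  simpa using h.length_le

-- the fold computing maxlen dominates the length of every space-containing member
theorem pv_maxLen_fold_le (l : List String) : ∀ (init : Int), init ≤
      l.foldl (fun m s => if PySem.Str.isIn " " s && decide (m < PySem.Str.len s)
        then PySem.Str.len s else m) init
    ∧ ∀ s ∈ l, PySem.Str.isIn " " s = true →
      PySem.Str.len s ≤ l.foldl (fun m s => if PySem.Str.isIn " " s && decide (m < PySem.Str.len s)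
        then PySem.Str.len s else m) init := by
  induction l with
  | nil => intro init; simp
  | cons x rest ih =>
    intro init
    simp only [List.foldl_cons]
    constructor
    · refine le_trans ?_ (ih _).1
      split_ifs with h
      · simp only [Bool.and_eq_true, decide_eq_true_eq] at h; omega
      · exact le_refl _
    · intro s hs hsp
      rcases List.mem_cons.1 hs with h | h
      · subst h
        refine le_trans ?_ (ih _).1
        simp only [hsp, Bool.true_and]
        split_ifs with h2
        · exact le_refl _
        · simp only [decide_eq_true_eq, not_lt] at h2; exact h2
      · exact (ih _).2 s h hsp

theorem pv_maxLen_le (sts : List String) (s : String) (hs : s ∈ sts)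
    (hsp : PySem.Str.isIn " " s = true) :
    PySem.Str.len s ≤ pvMaxLenB (PySem.Set.ofList sts) := by
  unfold pvMaxLenB
  exact (pv_maxLen_fold_le (PySem.Set.ofList sts) 0).2 s
    ((PySem.Set.mem_ofList sts s).2 hs) hsp

-- the substring scan finds exactly the space-containing members that are substrings of term
theorem pv_subScan_iff (term : String) (sts : List String) :
    pvSubScanB term (PySem.Set.ofList sts) (pvMaxLenB (PySem.Set.ofList sts)) = true
      ↔ ∃ s ∈ sts, PySem.Str.isIn " " s = true ∧ PySem.Str.isIn s term = true := by
  unfold pvSubScanB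
  simp only [List.any_eq_true, PySem.List.mem_pyRange_one, PySem.Set.contains_iff,
    PySem.Set.mem_ofList, Bool.and_eq_true]
  constructor
  · rintro ⟨i, ⟨hi0, hin⟩, j, ⟨hji, hjn⟩, hsp, hmem⟩
    refine ⟨_, hmem, hsp, ?_⟩
    rw [PySem.Str.isIn_iff_infix]
    have hsub : (PySem.Str.slice term (some i) (some j)).toList
        = (term.toList.drop i.toNat).take (j.toNat - i.toNat) := by
      simp only [PySem.Str.toList_slice, PySem.Chars.slice_eq_listSlice]
      exact PySem.List.slice_toNat term.toList hi0 (by omega)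
    rw [hsub]
    exact ((List.take_prefix _ _).isInfix).trans (List.drop_suffix _ _).isInfix
  · rintro ⟨s, hmem, hsp, hsub⟩
    rw [PySem.Str.isIn_iff_infix] at hsub
    obtain ⟨u, v, huv⟩ := hsub
    have hslen : 1 ≤ s.toList.length := by
      rw [PySem.Str.isIn_iff_infix] at hsp
      have h1 : (" ".toList).length ≤ s.toList.length := hsp.length_le
      simpa using h1
    have hn : term.toList.length = u.length + s.toList.length + v.length := by
      rw [← huv]; simp; omega
    have hlen : PySem.Str.len term = (term.toList.length : Int) := PySem.Str.len_eq term
    have hs : PySem.Str.slice term (some (u.length : Int))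
        (some ((u.length + s.toList.length : Nat) : Int)) = s := by
      apply String.toList_inj.mp
      rw [PySem.Str.toList_slice, PySem.Chars.slice_eq_listSlice]
      rw [show ((u.length + s.toList.length : Nat) : Int) = ((u.length + s.toList.length : Nat) : Int) from rfl]
      rw [PySem.List.slice_natCast term.toList u.length (u.length + s.toList.length)]
      rw [← huv, Nat.add_sub_cancel_left]
      rw [List.append_assoc, List.drop_left, List.take_left]
    have hmax := pv_maxLen_le sts s hmem hsp
    rw [PySem.Str.len_eq] at hmax
    refine ⟨(u.length : Int), ⟨by positivity, by rw [hlen]; omega⟩,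
            ((u.length + s.toList.length : Nat) : Int), ⟨by omega, by rw [hlen]; push_cast; omega⟩,
            ?_⟩
    rw [hs]
    exact ⟨hsp, hmem⟩

-- ===== VERDICT (by name: the statement is the Claim_ definition above) =====
theorem is_salvageable_blocked_term_py_spec : Claim_equal_is_salvageable_blocked_term_py := by
  intro term sts _
  unfold Spec_is_salvageable_blocked_term_py
  unfold is_salvageable_blocked_term_py is_salvageable_blocked_term_py_alt
  by_cases hc : term ∈ sts
  · simp [hc, PySem.Set.mem_ofList]
  · have hcb : PySem.Set.contains (PySem.Set.ofList sts) term = false := by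
      simp [PySem.Set.mem_ofList, hc]
    simp only [List.contains_eq_mem, hc, decide_false, Bool.false_eq_true, if_false, hcb]
    rw [Bool.eq_iff_iff]
    have hA : pvLoopA term (PySem.Set.ofList (PySem.Str.split₀ term)) sts = true
        ↔ ∃ s ∈ sts, s ≠ "" ∧ ((PySem.Str.isIn " " s = true ∧ PySem.Str.isIn s term = true)
            ∨ s ∈ PySem.Str.split₀ term) := by
      rw [pv_loopA_eq_any]
      simp only [List.any_eq_true, Bool.and_eq_true, Bool.or_eq_true, Bool.not_eq_eq_eq_not,
        Bool.not_true, beq_eq_false_iff_ne, ne_eq, PySem.Set.contains_iff, PySem.Set.mem_ofList]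
    have hB : (if (PySem.Str.split₀ term).any
            (fun tok => PySem.Set.contains (PySem.Set.ofList sts) tok) = true then true
          else pvSubScanB term (PySem.Set.ofList sts) (pvMaxLenB (PySem.Set.ofList sts))) = true
        ↔ (∃ t ∈ PySem.Str.split₀ term, t ∈ sts)
          ∨ ∃ s ∈ sts, PySem.Str.isIn " " s = true ∧ PySem.Str.isIn s term = true := by
      rw [← pv_subScan_iff term sts]
      split_ifs with h
      · simp only [List.any_eq_true, PySem.Set.contains_iff, PySem.Set.mem_ofList] at h
        simp [h]
      · simp only [List.any_eq_true, PySem.Set.contains_iff, PySem.Set.mem_ofList] at h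
        simp [h]
    rw [hA, hB]
    constructor
    · rintro ⟨s, hs, hne, ⟨hsp, hsub⟩ | htok⟩
      · exact Or.inr ⟨s, hs, hsp, hsub⟩
      · exact Or.inl ⟨s, htok, hs⟩
    · rintro (⟨t, htok, hts⟩ | ⟨s, hs, hsp, hsub⟩)
      · exact ⟨t, hts, pv_tokens_ne_empty term t htok, Or.inr htok⟩
      · exact ⟨s, hs, pv_space_ne_empty s hsp, Or.inl ⟨hsp, hsub⟩⟩
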